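-- pv_equiv track=rewrite | github.com/Aasthaengg/IBMdataset | Python_codes/p03488/s763673974.py | isReach
-- ===== SOURCE A (Python) =====
-- def isReach( goal, move, is_x):
--     msum = sum(move)
--     m = len(move)
--
--     if msum < abs(goal):
--         return False
--
--     dp = [[False for _ in range(msum*2+1)] for _ in range(m+1)]
--     dp[0][0] = True
--
--     for i in range(m):
--         for j in range(-msum,msum+1):
--             if i == 0 and dp[i][j] and is_x:
--                 dp[i+1][j+move[i]] = True
--             elif dp[i][j]:
--                 dp[i+1][j-move[i]] = True
--                 dp[i+1][j+move[i]] = True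
--
--     return dp[m][goal]
-- ===== SOURCE B (Python) =====
-- def isReach(goal, move, is_x):
--     msum = sum(move)
--     if msum < abs(goal):
--         return False
--     mask = 1 << msum          # bit (v + msum) set <=> sum v is reachable
--     for i, m in enumerate(move):
--         if i == 0 and is_x:
--             mask <<= m
--         else:
--             mask = (mask << m) | (mask >> m)
--     return (mask >> (goal + msum)) & 1 == 1
-- ===== Notes on version B (the rewrite author's own statement) =====
-- stated objective: alternative
-- what changed: Replaced the (m+1) x (2*sum+1) boolean DP table with nested loops over all offsets by a single big-integer bitset updated per move with two shifts (mask = mask<<m | mask>>m), eliminating the explicit inner loop over the 2*sum+1 offsets in favour of word-parallel bit operations.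
-- outside the precondition, e.g. on isReach(1, [3, -1], False): A returns True, B raises ValueError; on isReach(0, [1, -1], False): A raises IndexError, B raises ValueError
import Mathlib
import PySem

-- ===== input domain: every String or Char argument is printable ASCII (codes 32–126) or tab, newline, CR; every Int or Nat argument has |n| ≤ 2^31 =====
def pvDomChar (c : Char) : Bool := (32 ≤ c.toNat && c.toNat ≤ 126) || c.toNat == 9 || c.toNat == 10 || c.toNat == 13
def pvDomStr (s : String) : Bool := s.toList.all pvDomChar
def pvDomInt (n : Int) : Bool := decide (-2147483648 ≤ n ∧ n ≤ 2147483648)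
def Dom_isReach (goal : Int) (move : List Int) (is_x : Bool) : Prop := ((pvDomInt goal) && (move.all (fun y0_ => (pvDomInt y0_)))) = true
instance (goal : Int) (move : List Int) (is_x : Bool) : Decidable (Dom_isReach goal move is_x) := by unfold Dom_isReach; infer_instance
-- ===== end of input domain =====

-- B replaces A's (m+1)×(2·sum+1) boolean DP table and its inner loop over all offsets by a
-- single big-integer bitset updated with two shifts per move (a different algorithm of the
-- same asymptotic cost in bit operations).

-- ===== PORT A =====
-- Literal port of A. dp is the list of m+1 rows of length 2*msum+1; Python's negative
-- list indices (dp[i][j] for j < 0 wraps to j+len) are ported with pyGetD/pySetD, which are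
-- exact whenever the index is in range — on inputs satisfying Pre_isReach every index A uses
-- is in range (outside Pre_ the Python raises IndexError or wraps inconsistently; excluded).
def isReach (goal : Int) (move : List Int) (is_x : Bool) : Bool :=
  let msum := move.sum
  let m : Int := PySem.List.len move
  if msum < |goal| then false
  else
    let dp0 : List (List Bool) :=
      (PySem.List.pyRange 0 (m + 1) 1).map (fun _ =>
        (PySem.List.pyRange 0 (msum * 2 + 1) 1).map (fun _ => false))
    let dp1 := PySem.List.pySetD dp0 0
      (PySem.List.pySetD (PySem.List.pyGetD dp0 0 []) 0 true)
    let dp := (PySem.List.pyRange 0 m 1).foldl (fun dp i =>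
      (PySem.List.pyRange (-msum) (msum + 1) 1).foldl (fun dp j =>
        let mi := PySem.List.pyGetD move i 0
        if i == 0 && PySem.List.pyGetD (PySem.List.pyGetD dp i []) j false && is_x then
          PySem.List.pySetD dp (i + 1)
            (PySem.List.pySetD (PySem.List.pyGetD dp (i + 1) []) (j + mi) true)
        else if PySem.List.pyGetD (PySem.List.pyGetD dp i []) j false then
          let dpa := PySem.List.pySetD dp (i + 1)
            (PySem.List.pySetD (PySem.List.pyGetD dp (i + 1) []) (j - mi) true)
          PySem.List.pySetD dpa (i + 1)
            (PySem.List.pySetD (PySem.List.pyGetD dpa (i + 1) []) (j + mi) true)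
        else dp) dp) dp1
    PySem.List.pyGetD (PySem.List.pyGetD dp m []) goal false

-- ===== PORT B =====
-- Port of Source B. The Python bitmask is a nonnegative int throughout (bit v+msum ⇔ sum v
-- reachable); it is ported as a Nat, Python's <<, >>, |, & and == on it are Nat's
-- <<<, >>>, |||, &&& and ==. Shift amounts are .toNat of the (inside Pre_) nonnegative moves.
def isReach_alt (goal : Int) (move : List Int) (is_x : Bool) : Bool :=
  let msum := move.sum
  if msum < |goal| then false
  else
    let mask : Nat := 1 <<< msum.toNat
    let mask := (PySem.List.enumerate move).foldl (fun mask im =>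
      if im.1 == (0 : Int) && is_x then mask <<< im.2.toNat
      else (mask <<< im.2.toNat) ||| (mask >>> im.2.toNat)) mask
    ((mask >>> (goal + msum).toNat) &&& 1) == 1

-- ===== PRECONDITION & SPEC =====
-- Pre_ excludes lists with a negative move whose total sum still reaches |goal|: there A's
-- negative dp indices wrap inconsistently, so A raises IndexError or returns an accidental
-- aliased value (e.g. True for an unreachable goal), while B's shift by a negative amount
-- raises ValueError. (When sum(move) < |goal| both return False at once, so such inputs stay inside.)
def Pre_isReach (goal : Int) (move : List Int) (is_x : Bool) : Prop :=
  (∀ x ∈ move, 0 ≤ x) ∨ move.sum < |goal|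
instance (goal : Int) (move : List Int) (is_x : Bool) : Decidable (Pre_isReach goal move is_x) := by
  unfold Pre_isReach; infer_instance

def pvWitness_isReach : Int × List Int × Bool := (3, [1, 2], true)

def Spec_isReach (goal : Int) (move : List Int) (is_x : Bool) (out : Bool) : Prop := out = isReach_alt goal move is_x
instance (goal : Int) (move : List Int) (is_x : Bool) (out : Bool) : Decidable (Spec_isReach goal move is_x out) := by unfold Spec_isReach; infer_instance

-- ===== CLAIM (what is proved, stated in full; the proofs are below) =====
def Claim_equal_isReach : Prop := ∀ (goal : Int) (move : List Int) (is_x : Bool), Dom_isReach goal move is_x → Pre_isReach goal move is_x → Spec_isReach goal move is_x (isReach goal move is_x)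

-- ===== LEMMAS AND PROOFS =====

-- ===== proof-side definitions =====
def pvMaskStep (fx : Bool) (msk : Nat) (mm : Nat) : Nat :=
  if fx then msk <<< mm else (msk <<< mm) ||| (msk >>> mm)

def pvMask (is_x : Bool) (move : List Int) (M : Nat) : Nat → Nat
  | 0 => 1 <<< M
  | k+1 => pvMaskStep (decide (k = 0) && is_x) (pvMask is_x move M k) (move.getD k 0).toNat

def pvRow (msk : Nat) (M : Nat) : List Bool :=
  (List.range (2*M+1)).map (fun u => msk.testBit ((u+M) % (2*M+1)))

def pvEnc (M : Nat) (x : Int) : Nat := (if x < 0 then x + (2*M+1) else x).toNat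

def pvRBody (R : List Bool) (mi : Int) (fx : Bool) (r : List Bool) (j : Int) : List Bool :=
  if fx && PySem.List.pyGetD R j false then PySem.List.pySetD r (j + mi) true
  else if PySem.List.pyGetD R j false then
    PySem.List.pySetD (PySem.List.pySetD r (j - mi) true) (j + mi) true
  else r

-- ===== basic lemmas =====
theorem pv_length_pvRow (msk M : Nat) : (pvRow msk M).length = 2*M+1 := by
  simp [pvRow]

theorem pv_testBit_one (j : Nat) : Nat.testBit 1 j = decide (j = 0) := by
  rcases j with _|j
  · simp
  · simp [Nat.testBit_succ]

theorem pv_read (msk M : Nat) (j : Int) (hj1 : -(M:Int) ≤ j) (hj2 : j ≤ M) :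
    PySem.List.pyGetD (pvRow msk M) j false = msk.testBit (j + M).toNat := by
  rcases le_or_gt 0 j with h | h
  · have : j = ((j.toNat : Nat) : Int) := by omega
    rw [this, PySem.List.pyGetD_natCast]
    have hlt : j.toNat < 2*M+1 := by omega
    have : ((List.range (2*M+1)).map (fun u => msk.testBit ((u+M) % (2*M+1)))).getD j.toNat false
        = msk.testBit ((j.toNat + M) % (2*M+1)) := by
      rw [List.getD_eq_getElem _ _ (by simpa using hlt)]
      simp
    rw [pvRow, this, Nat.mod_eq_of_lt (by omega : j.toNat + M < 2*M+1)]
    congr 1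
  · set k : Nat := (-j).toNat with hk
    have hj' : j = -(k : Int) := by omega
    have hk1 : 0 < k := by omega
    have hk2 : k ≤ (pvRow msk M).length := by rw [pv_length_pvRow]; omega
    rw [hj', PySem.List.pyGetD_neg_natCast _ _ _ hk1 hk2]
    simp only [pvRow, List.getElem_map, List.getElem_range, List.length_map, List.length_range]
    have h1 : (2*M+1 - k + M) % (2*M+1) = M - k := by
      have hkM : k ≤ M := by omega
      have : 2*M+1 - k + M = (M - k) + (2*M+1) := by omega
      rw [this, Nat.add_mod_right, Nat.mod_eq_of_lt (by omega)]
    rw [h1]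
    congr 1
    omega

theorem pv_write (M : Nat) (r : List Bool) (hr : r.length = 2*M+1) (x : Int) (v : Bool)
    (hx1 : -(M:Int) ≤ x) (hx2 : x ≤ M) :
    PySem.List.pySetD r x v = r.set (pvEnc M x) v := by
  rcases le_or_gt 0 x with h | h
  · rw [PySem.List.pySetD_of_nonneg _ _ h, pvEnc, if_neg (by omega)]
  · simp only [PySem.List.pySetD, PySem.List.pySet?, PySem.List.pyIdx?]
    rw [if_neg (by omega), if_pos (by omega)]
    simp only [Option.map_some, Option.getD_some]
    congr 1
    rw [pvEnc, if_pos h]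
    omega

theorem pv_getD_set {α : Type} (l : List α) (a b : Nat) (v d : α) :
    (l.set a v).getD b d = if b = a ∧ a < l.length then v else l.getD b d := by
  simp [List.getD, List.getElem?_set]
  split_ifs <;> simp_all

theorem pv_take_sum_bounds (move : List Int) (hn : ∀ x ∈ move, 0 ≤ x) (k : Nat) :
    0 ≤ (move.take k).sum ∧ (move.take k).sum ≤ move.sum := by
  constructor
  · exact List.sum_nonneg (fun x hx => hn x (List.mem_of_mem_take hx))
  · have h1 : 0 ≤ (move.drop k).sum := List.sum_nonneg (fun x hx => hn x (List.mem_of_mem_drop hx))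
    have h2 : (move.take k).sum + (move.drop k).sum = move.sum := by
      rw [← List.sum_append, List.take_append_drop]
    omega

theorem pv_bits (is_x : Bool) (move : List Int) (M : Nat)
    (hn : ∀ x ∈ move, 0 ≤ x) :
    ∀ k, k ≤ move.length → ∀ b : Nat, (pvMask is_x move M k).testBit b = true →
      (M:Int) ≤ (b:Int) + (move.take k).sum ∧ (b:Int) ≤ (M:Int) + (move.take k).sum := by
  intro k
  induction k with
  | zero =>
    intro _ b htb
    simp only [pvMask, Nat.testBit_shiftLeft, pv_testBit_one, Bool.and_eq_true,
      decide_eq_true_eq] at htb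
    have : b = M := by omega
    simp [this]
  | succ k ih =>
    intro hk b htb
    have hkl : k < move.length := by omega
    have hmv : move.getD k 0 = move[k] := List.getD_eq_getElem move 0 hkl
    have h0 : 0 ≤ move[k] := hn _ (List.getElem_mem hkl)
    have hsum : (move.take (k+1)).sum = (move.take k).sum + move[k] :=
      List.sum_take_succ move k hkl
    have hcast : ((move.getD k 0).toNat : Int) = move[k] := by
      rw [hmv]; omega
    simp only [pvMask, pvMaskStep] at htb
    split_ifs at htb with hfx
    · rw [Nat.testBit_shiftLeft] at htb
      simp only [Bool.and_eq_true, decide_eq_true_eq] at htb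
      obtain ⟨hle, htb'⟩ := htb
      have := ih (by omega) _ htb'
      have hc2 : ((b - (move.getD k 0).toNat : Nat) : Int) = (b:Int) - move[k] := by omega
      omega
    · rw [Nat.testBit_or] at htb
      rcases Bool.or_eq_true _ _ |>.mp htb with h | h
      · rw [Nat.testBit_shiftLeft] at h
        simp only [Bool.and_eq_true, decide_eq_true_eq] at h
        obtain ⟨hle, htb'⟩ := h
        have := ih (by omega) _ htb'
        have hc2 : ((b - (move.getD k 0).toNat : Nat) : Int) = (b:Int) - move[k] := by omega
        omega
      · rw [Nat.testBit_shiftRight] at h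
        have := ih (by omega) _ h
        have hc2 : (((move.getD k 0).toNat + b : Nat) : Int) = move[k] + (b:Int) := by omega
        omega

def pvBodyA (move : List Int) (is_x : Bool) (i : Int) (dp : List (List Bool)) (j : Int) :
    List (List Bool) :=
  let mi := PySem.List.pyGetD move i 0
  if i == 0 && PySem.List.pyGetD (PySem.List.pyGetD dp i []) j false && is_x then
    PySem.List.pySetD dp (i + 1)
      (PySem.List.pySetD (PySem.List.pyGetD dp (i + 1) []) (j + mi) true)
  else if PySem.List.pyGetD (PySem.List.pyGetD dp i []) j false then
    let dpa := PySem.List.pySetD dp (i + 1)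
      (PySem.List.pySetD (PySem.List.pyGetD dp (i + 1) []) (j - mi) true)
    PySem.List.pySetD dpa (i + 1)
      (PySem.List.pySetD (PySem.List.pyGetD dpa (i + 1) []) (j + mi) true)
  else dp

theorem pv_body_eq (move : List Int) (is_x : Bool) (k : Nat) (dp : List (List Bool))
    (hlen : k + 1 < dp.length) (j : Int) :
    pvBodyA move is_x (k:Int) dp j
      = dp.set (k+1)
          (pvRBody (dp.getD k []) (PySem.List.pyGetD move (k:Int) 0) (decide (k = 0) && is_x)
            (dp.getD (k+1) []) j) := by
  have hc1 : ((k:Int) + 1) = ((k+1 : Nat) : Int) := by push_cast; ring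
  have hget : PySem.List.pyGetD dp (k:Int) [] = dp.getD k [] := PySem.List.pyGetD_natCast dp k []
  have hcond : ((k:Int) == 0) = decide (k = 0) := by
    by_cases h : k = 0
    · subst h; rfl
    · have h1 : ((k:Int) == 0) = false := by simp; omega
      have h2 : decide (k = 0) = false := by simp [h]
      rw [h1, h2]
  rw [pvBodyA, pvRBody]
  simp only [hget, hcond]
  by_cases hread : PySem.List.pyGetD (dp.getD k []) j false = true
  · by_cases hfx : (decide (k = 0) && is_x) = true
    · have h1 := Bool.and_eq_true _ _ |>.mp hfx
      have hcondt : (decide (k = 0) && PySem.List.pyGetD (dp.getD k []) j false && is_x) = true := by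
        rw [h1.1, hread, h1.2]; rfl
      rw [if_pos hcondt, if_pos (by rw [hfx, hread]; rfl)]
      simp only [hc1, PySem.List.pyGetD_natCast, PySem.List.pySetD_natCast]
    · have hfx' : (decide (k = 0) && is_x) = false := Bool.eq_false_iff.mpr hfx
      have hcondf : (decide (k = 0) && PySem.List.pyGetD (dp.getD k []) j false && is_x) = false := by
        rcases Bool.and_eq_false_iff.mp hfx' with h | h
        · rw [h]; rfl
        · rw [h]; simp
      rw [if_neg (by rw [hcondf]; simp), if_pos hread]
      rw [if_neg (by rw [hfx']; simp), if_pos hread]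
      simp only [hc1, PySem.List.pyGetD_natCast, PySem.List.pySetD_natCast, List.set_set]
      rw [pv_getD_set, if_pos ⟨rfl, by omega⟩]
  · have hread' : PySem.List.pyGetD (dp.getD k []) j false = false := Bool.eq_false_iff.mpr hread
    have hcondf : (decide (k = 0) && PySem.List.pyGetD (dp.getD k []) j false && is_x) = false := by
      rw [hread']; simp
    rw [if_neg (by rw [hcondf]; simp), if_neg (by rw [hread']; simp)]
    rw [if_neg (by rw [hread']; simp), if_neg (by rw [hread']; simp)]
    rw [List.getD_eq_getElem dp [] (by omega : k+1 < dp.length), List.set_getElem_self]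

theorem pv_inner (move : List Int) (is_x : Bool) (k : Nat) :
    ∀ (js : List Int) (dp : List (List Bool)), k + 1 < dp.length →
    js.foldl (pvBodyA move is_x (k:Int)) dp
      = dp.set (k+1)
          (js.foldl (pvRBody (dp.getD k []) (PySem.List.pyGetD move (k:Int) 0) (decide (k = 0) && is_x))
            (dp.getD (k+1) [])) := by
  intro js
  induction js with
  | nil =>
    intro dp hlen
    simp only [List.foldl_nil]
    rw [List.getD_eq_getElem dp [] (by omega), List.set_getElem_self]
  | cons j js ih =>
    intro dp hlen
    rw [List.foldl_cons, List.foldl_cons, pv_body_eq move is_x k dp hlen j]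
    set R' := pvRBody (dp.getD k []) (PySem.List.pyGetD move (k:Int) 0) (decide (k = 0) && is_x)
      (dp.getD (k + 1) []) j with hR'
    rw [ih _ (by rw [List.length_set]; omega)]
    rw [show (dp.set (k+1) R').getD k [] = dp.getD k [] from by
      rw [pv_getD_set, if_neg (by omega)]]
    rw [show (dp.set (k+1) R').getD (k+1) [] = R' from by
      rw [pv_getD_set, if_pos ⟨rfl, by omega⟩]]
    rw [List.set_set]

theorem pvEnc_lt (M : Nat) (x : Int) (hx1 : -(M:Int) ≤ x) (hx2 : x ≤ M) : pvEnc M x < 2*M+1 := by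
  unfold pvEnc; split_ifs <;> omega

theorem pvEnc_eq_iff (M : Nat) (x : Int) (u : Nat) (hx1 : -(M:Int) ≤ x) (hx2 : x ≤ M)
    (hu : u < 2*M+1) : u = pvEnc M x ↔ ((u:Int) = x ∨ (u:Int) = x + (2*M+1)) := by
  unfold pvEnc; split_ifs <;> omega

theorem pv_rowfold (M msk mi : Nat) (fx : Bool) (S : Int)
    (hbits : ∀ b : Nat, msk.testBit b = true → (M:Int) ≤ (b:Int) + S ∧ (b:Int) ≤ (M:Int) + S)
    (hSm : S + (mi:Int) ≤ (M:Int)) :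
    ∀ (js : List Int), (∀ j ∈ js, -(M:Int) ≤ j ∧ j ≤ (M:Int)) →
    ∀ (r : List Bool), r.length = 2*M+1 →
    (js.foldl (pvRBody (pvRow msk M) (mi:Int) fx) r).length = 2*M+1 ∧
    ∀ u : Nat,
    (js.foldl (pvRBody (pvRow msk M) (mi:Int) fx) r).getD u false
      = (r.getD u false || js.any (fun j => (msk.testBit ((j+(M:Int)).toNat)) &&
          (decide (u = pvEnc M (j + mi)) || (!fx && decide (u = pvEnc M (j - mi)))))) := by
  intro js
  induction js with
  | nil => intro _ r hr; simp [hr]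
  | cons j js ih =>
    intro hjs r hr
    have hj := hjs j (List.mem_cons_self)
    have hread : PySem.List.pyGetD (pvRow msk M) j false = msk.testBit ((j+(M:Int)).toNat) :=
      pv_read msk M j hj.1 hj.2
    rw [List.foldl_cons]
    by_cases ht : msk.testBit ((j+(M:Int)).toNat) = true
    · have hb := hbits _ ht
      have hb0 : (((j+(M:Int)).toNat : Nat) : Int) = j + M := by omega
      have hj1 : -(M:Int) ≤ j + mi ∧ (j + (mi:Int)) ≤ M := by omega
      have hj2 : -(M:Int) ≤ j - mi ∧ (j - (mi:Int)) ≤ M := by omega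
      have he1 : pvEnc M (j + mi) < 2*M+1 := pvEnc_lt M _ hj1.1 hj1.2
      have he2 : pvEnc M (j - mi) < 2*M+1 := pvEnc_lt M _ hj2.1 hj2.2
      by_cases hfx : fx = true
      · have hstep : pvRBody (pvRow msk M) (mi:Int) fx r j = r.set (pvEnc M (j + mi)) true := by
          rw [pvRBody, if_pos (by rw [hfx, hread, ht]; rfl)]
          exact pv_write M r hr _ true hj1.1 hj1.2
        rw [hstep]
        obtain ⟨ihl, ihd⟩ := ih (fun x hx => hjs x (List.mem_cons_of_mem _ hx))
          (r.set (pvEnc M (j + mi)) true) (by rw [List.length_set]; exact hr)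
        refine ⟨ihl, fun u => ?_⟩
        rw [ihd u, pv_getD_set]
        by_cases hu : u = pvEnc M (j + mi)
        · rw [if_pos ⟨hu, by omega⟩]
          simp [ht, hu, hfx]
        · rw [if_neg (by intro h; exact hu h.1)]
          simp [hu, hfx]
      · have hfx' : fx = false := Bool.eq_false_iff.mpr hfx
        have hstep : pvRBody (pvRow msk M) (mi:Int) fx r j
            = (r.set (pvEnc M (j - mi)) true).set (pvEnc M (j + mi)) true := by
          rw [pvRBody, if_neg (by rw [hfx']; simp), if_pos (by rw [hread, ht])]
          rw [pv_write M r hr _ true hj2.1 hj2.2]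
          exact pv_write M _ (by rw [List.length_set]; exact hr) _ true hj1.1 hj1.2
        rw [hstep]
        obtain ⟨ihl, ihd⟩ := ih (fun x hx => hjs x (List.mem_cons_of_mem _ hx))
          ((r.set (pvEnc M (j - mi)) true).set (pvEnc M (j + mi)) true)
          (by rw [List.length_set, List.length_set]; exact hr)
        refine ⟨ihl, fun u => ?_⟩
        rw [ihd u, pv_getD_set, pv_getD_set]
        by_cases hu1 : u = pvEnc M (j + mi)
        · rw [if_pos ⟨hu1, by rw [List.length_set]; omega⟩]
          simp [ht, hu1, hfx']
        · rw [if_neg (by intro h; exact hu1 h.1)]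
          by_cases hu2 : u = pvEnc M (j - mi)
          · rw [if_pos ⟨hu2, by omega⟩]
            simp [ht, hu2, hfx']
          · rw [if_neg (by intro h; exact hu2 h.1)]
            simp [hu1, hu2]
    · have ht' : msk.testBit ((j+(M:Int)).toNat) = false := Bool.eq_false_iff.mpr ht
      have hstep : pvRBody (pvRow msk M) (mi:Int) fx r j = r := by
        rw [pvRBody, if_neg (by rw [hread, ht']; simp), if_neg (by rw [hread, ht']; simp)]
      rw [hstep]
      obtain ⟨ihl, ihd⟩ := ih (fun x hx => hjs x (List.mem_cons_of_mem _ hx)) r hr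
      refine ⟨ihl, fun u => ?_⟩
      rw [ihd u]
      simp [ht']

theorem pv_bool_ext (a b : Bool) : (a = true ↔ b = true) → a = b := by
  cases a <;> cases b <;> simp

theorem pv_rowstep (M msk mi : Nat) (fx : Bool) (S : Int)
    (hbits : ∀ b : Nat, msk.testBit b = true → (M:Int) ≤ (b:Int) + S ∧ (b:Int) ≤ (M:Int) + S)
    (hS : 0 ≤ S) (hSm : S + (mi:Int) ≤ (M:Int)) :
    (PySem.List.pyRange (-(M:Int)) ((M:Int)+1) 1).foldl (pvRBody (pvRow msk M) (mi:Int) fx)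
      (List.replicate (2*M+1) false)
      = pvRow (pvMaskStep fx msk mi) M := by
  obtain ⟨hl, hd⟩ := pv_rowfold M msk mi fx S hbits hSm
    (PySem.List.pyRange (-(M:Int)) ((M:Int)+1) 1)
    (fun j hj => by
      rw [PySem.List.mem_pyRange_one] at hj; exact ⟨hj.1, by omega⟩)
    (List.replicate (2*M+1) false) (by simp)
  apply List.ext_getElem (by rw [hl, pv_length_pvRow])
  intro u hu1 hu2
  have hu : u < 2*M+1 := by rw [hl] at hu1; exact hu1
  rw [← List.getD_eq_getElem _ false hu1, ← List.getD_eq_getElem _ false hu2, hd u]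
  have hrepl : (List.replicate (2*M+1) false).getD u false = false := by
    simp [List.getD]
  rw [hrepl, Bool.false_or]
  have hrow : (pvRow (pvMaskStep fx msk mi) M).getD u false
      = (pvMaskStep fx msk mi).testBit ((u+M) % (2*M+1)) := by
    rw [pvRow, List.getD_eq_getElem _ false (by simpa using hu)]
    simp
  rw [hrow]
  set T := (u+M) % (2*M+1) with hTdef
  have hTlt : T < 2*M+1 := Nat.mod_lt _ (by omega)
  have hTval : u + M = T ∨ u + M = T + (2*M+1) := by
    by_cases h : u + M < 2*M+1
    · left; rw [hTdef, Nat.mod_eq_of_lt h]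
    · right
      rw [hTdef, Nat.mod_eq_sub_mod (by omega), Nat.mod_eq_of_lt (by omega)]
      omega
  apply pv_bool_ext
  rw [List.any_eq_true]
  constructor
  · rintro ⟨j, hmem, hterm⟩
    rw [PySem.List.mem_pyRange_one] at hmem
    simp only [Bool.and_eq_true, Bool.or_eq_true, decide_eq_true_eq] at hterm
    obtain ⟨htb, hcase⟩ := hterm
    have hb0 : (((j+(M:Int)).toNat : Nat) : Int) = j + M := by omega
    have hbj := hbits _ htb
    rcases hcase with hu' | ⟨hfxf, hu'⟩
    · have henc := (pvEnc_eq_iff M (j+mi) u (by omega) (by omega) hu).mp hu'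
      have hTj : (T:Int) = j + mi + M := by omega
      unfold pvMaskStep
      split_ifs with hfx
      · rw [Nat.testBit_shiftLeft]
        simp only [Bool.and_eq_true, decide_eq_true_eq]
        refine ⟨by omega, ?_⟩
        have : T - mi = (j+(M:Int)).toNat := by omega
        rw [this, htb]
      · rw [Nat.testBit_or, Nat.testBit_shiftLeft]
        apply Bool.or_eq_true _ _ |>.mpr
        left
        simp only [Bool.and_eq_true, decide_eq_true_eq]
        refine ⟨by omega, ?_⟩
        have : T - mi = (j+(M:Int)).toNat := by omega
        rw [this, htb]
    · have hfx' : fx = false := by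
        revert hfxf; cases fx <;> simp
      have henc := (pvEnc_eq_iff M (j-mi) u (by omega) (by omega) hu).mp hu'
      have hTj : (T:Int) = j - mi + M := by omega
      unfold pvMaskStep
      rw [if_neg (by rw [hfx']; simp)]
      rw [Nat.testBit_or, Nat.testBit_shiftRight]
      apply Bool.or_eq_true _ _ |>.mpr
      right
      have : mi + T = (j+(M:Int)).toNat := by omega
      rw [this, htb]
  · intro h
    unfold pvMaskStep at h
    split_ifs at h with hfx
    · rw [Nat.testBit_shiftLeft] at h
      simp only [Bool.and_eq_true, decide_eq_true_eq] at h
      obtain ⟨hmiT, htb⟩ := h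
      have hbj := hbits _ htb
      refine ⟨(T:Int) - mi - M, ?_, ?_⟩
      · rw [PySem.List.mem_pyRange_one]
        omega
      · simp only [Bool.and_eq_true, Bool.or_eq_true, decide_eq_true_eq]
        constructor
        · have : ((T:Int) - mi - M + M).toNat = T - mi := by omega
          rw [this, htb]
        · left
          rw [pvEnc_eq_iff M _ u (by omega) (by omega) hu]
          omega
    · rw [Nat.testBit_or, Nat.testBit_shiftLeft, Nat.testBit_shiftRight] at h
      rcases Bool.or_eq_true _ _ |>.mp h with h' | h'
      · simp only [Bool.and_eq_true, decide_eq_true_eq] at h'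
        obtain ⟨hmiT, htb⟩ := h'
        have hbj := hbits _ htb
        refine ⟨(T:Int) - mi - M, ?_, ?_⟩
        · rw [PySem.List.mem_pyRange_one]
          omega
        · simp only [Bool.and_eq_true, Bool.or_eq_true, decide_eq_true_eq]
          constructor
          · have : ((T:Int) - mi - M + M).toNat = T - mi := by omega
            rw [this, htb]
          · left
            rw [pvEnc_eq_iff M _ u (by omega) (by omega) hu]
            omega
      · have hbj := hbits _ h'
        refine ⟨(mi + T : Nat) - (M:Int), ?_, ?_⟩
        · rw [PySem.List.mem_pyRange_one]
          omega
        · simp only [Bool.and_eq_true, Bool.or_eq_true, decide_eq_true_eq]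
          constructor
          · have : (((mi + T : Nat) : Int) - M + M).toNat = mi + T := by omega
            rw [this, h']
          · right
            refine ⟨by simp [Bool.eq_false_iff.mpr hfx], ?_⟩
            rw [pvEnc_eq_iff M _ u (by omega) (by omega) hu]
            omega

theorem pv_row_getD (X M u : Nat) (hu : u < 2*M+1) :
    (pvRow X M).getD u false = X.testBit ((u+M) % (2*M+1)) := by
  rw [pvRow, List.getD_eq_getElem _ false (by simpa using hu)]
  simp

theorem pv_row_init (M : Nat) :
    pvRow (1 <<< M) M = (List.replicate (2*M+1) false).set 0 true := by
  apply List.ext_getElem (by simp [pv_length_pvRow])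
  intro u hu1 hu2
  have hu : u < 2*M+1 := by simpa [pv_length_pvRow] using hu1
  rw [← List.getD_eq_getElem _ false hu1, ← List.getD_eq_getElem _ false hu2]
  rw [pv_row_getD _ _ _ hu, pv_getD_set]
  rw [Nat.testBit_shiftLeft, pv_testBit_one]
  set T := (u+M) % (2*M+1) with hTdef
  have hTlt : T < 2*M+1 := Nat.mod_lt _ (by omega)
  have hTval : u + M = T ∨ u + M = T + (2*M+1) := by
    by_cases h : u + M < 2*M+1
    · left; rw [hTdef, Nat.mod_eq_of_lt h]
    · right
      rw [hTdef, Nat.mod_eq_sub_mod (by omega), Nat.mod_eq_of_lt (by omega)]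
      omega
  by_cases h0 : u = 0
  · subst h0
    rw [if_pos ⟨rfl, by simp⟩]
    have : T = M := by omega
    simp [this]
  · rw [if_neg (by intro h; exact h0 h.1)]
    have hrep : (List.replicate (2*M+1) false).getD u false = false := by simp [List.getD]
    rw [hrep]
    by_cases hMT : M ≤ T
    · have : ¬ (T - M = 0) := by omega
      simp [hMT, this]
    · simp [hMT]

def pvBodyB (is_x : Bool) (mask : Nat) (im : Int × Int) : Nat :=
  if im.1 == (0 : Int) && is_x then mask <<< im.2.toNat
  else (mask <<< im.2.toNat) ||| (mask >>> im.2.toNat)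

theorem pv_bfold (move : List Int) (is_x : Bool) (M : Nat) :
    ∀ t, t ≤ move.length →
    (PySem.List.enumerate (move.take t)).foldl (pvBodyB is_x) (1 <<< M)
      = pvMask is_x move M t := by
  intro t
  induction t with
  | zero => intro _; simp [pvMask]
  | succ t ih =>
    intro ht
    have hkl : t < move.length := by omega
    have htake : move.take (t+1) = move.take t ++ [move[t]] := by
      rw [List.take_add_one, List.getElem?_eq_getElem hkl]
      rfl
    have hlen : (move.take t).length = t := by
      rw [List.length_take]; omega
    rw [htake, PySem.List.enumerate_append, List.foldl_append, ih (by omega)]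
    rw [hlen]
    have hone : PySem.List.enumerate [move[t]] ((0:Int) + t) = [((t:Int), move[t])] := by
      rw [PySem.List.enumerate_cons]
      simp [PySem.List.enumerate]
    rw [hone, List.foldl_cons, List.foldl_nil]
    have hcond : (((t:Int)) == (0:Int)) = decide (t = 0) := by
      by_cases h : t = 0
      · subst h; rfl
      · have h1 : (((t:Int)) == (0:Int)) = false := by simp; omega
        have h2 : decide (t = 0) = false := by simp [h]
        rw [h1, h2]
    have hm : move[t].toNat = (move.getD t 0).toNat := by
      rw [List.getD_eq_getElem move 0 hkl]
    rw [pvBodyB, pvMask, pvMaskStep, hcond, hm]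

theorem pv_outer (move : List Int) (is_x : Bool) (M : Nat)
    (hn : ∀ x ∈ move, 0 ≤ x) (hM : move.sum = (M:Int)) :
    ∀ t, t ≤ move.length →
    ((PySem.List.pyRange 0 (t:Int) 1).foldl
        (fun dp i => (PySem.List.pyRange (-(M:Int)) ((M:Int)+1) 1).foldl (pvBodyA move is_x i) dp)
        ((List.replicate (move.length+1) (List.replicate (2*M+1) false)).set 0 (pvRow (1 <<< M) M))).length
      = move.length+1
    ∧ ∀ k, k < move.length+1 →
      ((PySem.List.pyRange 0 (t:Int) 1).foldl
        (fun dp i => (PySem.List.pyRange (-(M:Int)) ((M:Int)+1) 1).foldl (pvBodyA move is_x i) dp)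
        ((List.replicate (move.length+1) (List.replicate (2*M+1) false)).set 0 (pvRow (1 <<< M) M))).getD k []
      = if k ≤ t then pvRow (pvMask is_x move M k) M else List.replicate (2*M+1) false := by
  intro t
  induction t with
  | zero =>
    intro _
    rw [show PySem.List.pyRange ((0:Int)) (((0:Nat)):Int) 1 = [] from PySem.List.pyRange_one_eq_nil le_rfl, List.foldl_nil]
    refine ⟨by simp, fun k hk => ?_⟩
    by_cases h0 : k = 0
    · subst h0
      rw [pv_getD_set, if_pos ⟨rfl, by simp⟩, if_pos (by omega)]
      rfl
    · rw [pv_getD_set, if_neg (fun h => h0 h.1), if_neg (by omega)]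
      rw [List.getD_eq_getElem _ [] (by simpa using hk), List.getElem_replicate]
  | succ t ih =>
    intro ht
    obtain ⟨ihl, ihd⟩ := ih (by omega)
    have hc1 : ((t+1 : Nat) : Int) = (t:Int) + 1 := by push_cast; ring
    rw [hc1, PySem.List.pyRange_one_succ_right (a := 0) (b := (t:Int)) (Int.natCast_nonneg t), List.foldl_append,
      List.foldl_cons, List.foldl_nil]
    set dpt := ((PySem.List.pyRange 0 (t:Int) 1).foldl
        (fun dp i => (PySem.List.pyRange (-(M:Int)) ((M:Int)+1) 1).foldl (pvBodyA move is_x i) dp)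
        ((List.replicate (move.length+1) (List.replicate (2*M+1) false)).set 0 (pvRow (1 <<< M) M)))
      with hdpt
    have hlen : t + 1 < dpt.length := by rw [ihl]; omega
    rw [pv_inner move is_x t _ dpt hlen]
    have hrowt : dpt.getD t [] = pvRow (pvMask is_x move M t) M := by
      rw [ihd t (by omega), if_pos (by omega)]
    have hrowt1 : dpt.getD (t+1) [] = List.replicate (2*M+1) false := by
      rw [ihd (t+1) (by omega), if_neg (by omega)]
    have hmi : PySem.List.pyGetD move (t:Int) 0 = (((move.getD t 0).toNat : Nat) : Int) := by
      rw [PySem.List.pyGetD_natCast]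
      have : 0 ≤ move.getD t 0 := by
        rw [List.getD_eq_getElem move 0 (by omega)]
        exact hn _ (List.getElem_mem _)
      omega
    have hSb := pv_take_sum_bounds move hn t
    have hSb1 := pv_take_sum_bounds move hn (t+1)
    have hsum : (move.take (t+1)).sum = (move.take t).sum + move[t] :=
      List.sum_take_succ move t (by omega)
    have hgd : move.getD t 0 = move[t] := List.getD_eq_getElem move 0 (by omega)
    have hstep : (PySem.List.pyRange (-(M:Int)) ((M:Int)+1) 1).foldl
        (pvRBody (dpt.getD t []) (PySem.List.pyGetD move (t:Int) 0) (decide (t = 0) && is_x))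
        (dpt.getD (t+1) [])
        = pvRow (pvMask is_x move M (t+1)) M := by
      rw [hrowt, hrowt1, hmi]
      rw [pv_rowstep M (pvMask is_x move M t) (move.getD t 0).toNat (decide (t = 0) && is_x)
        (move.take t).sum (pv_bits is_x move M hn t (by omega)) hSb.1 (by omega)]
      rfl
    rw [hstep]
    refine ⟨by rw [List.length_set, ihl], fun k hk => ?_⟩
    by_cases hkt : k = t + 1
    · subst hkt
      rw [pv_getD_set, if_pos ⟨rfl, by omega⟩, if_pos (by omega)]
    · rw [pv_getD_set, if_neg (fun h => hkt h.1), ihd k hk]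
      by_cases hle : k ≤ t
      · rw [if_pos hle, if_pos (by omega)]
      · rw [if_neg hle, if_neg (by omega)]

theorem pv_testBit_read (x n : Nat) : (((x >>> n) &&& 1) == 1) = x.testBit n := by
  simp [Nat.testBit, Nat.and_comm]

theorem pv_main : ∀ (goal : Int) (move : List Int) (is_x : Bool),
    ((∀ x ∈ move, 0 ≤ x) ∨ move.sum < |goal|) →
    isReach goal move is_x = isReach_alt goal move is_x := by
  intro g move is_x hpre
  by_cases hms : move.sum < |g|
  · simp only [isReach, isReach_alt]
    rw [if_pos hms, if_pos hms]
  · have hn : ∀ x ∈ move, 0 ≤ x := by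
      rcases hpre with h | h
      · exact h
      · exact absurd h hms
    have hg0 : 0 ≤ move.sum := le_trans (abs_nonneg g) (not_lt.mp hms)
    have hga := abs_le.mp (not_lt.mp hms)
    set M := move.sum.toNat with hMdef
    have hM : move.sum = (M:Int) := by omega
    -- B side closed form
    have hB : isReach_alt g move is_x
        = (((((PySem.List.enumerate move).foldl (pvBodyB is_x) (1 <<< M)) >>> ((g + move.sum).toNat)) &&& 1) == 1) := by
      simp only [isReach_alt]
      rw [if_neg hms]
      rfl
    have hBfold := pv_bfold move is_x M move.length le_rfl
    rw [List.take_length] at hBfold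
    rw [hB, hBfold, pv_testBit_read]
    -- A side closed form
    have hA : isReach g move is_x
        = PySem.List.pyGetD (PySem.List.pyGetD
            ((PySem.List.pyRange 0 (PySem.List.len move) 1).foldl
              (fun dp i => (PySem.List.pyRange (-move.sum) (move.sum+1) 1).foldl (pvBodyA move is_x i) dp)
              (PySem.List.pySetD
                ((PySem.List.pyRange 0 (PySem.List.len move + 1) 1).map (fun _ =>
                  (PySem.List.pyRange 0 (move.sum*2+1) 1).map (fun _ => false)))
                0
                (PySem.List.pySetD
                  (PySem.List.pyGetD ((PySem.List.pyRange 0 (PySem.List.len move + 1) 1).map (fun _ =>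
                    (PySem.List.pyRange 0 (move.sum*2+1) 1).map (fun _ => false))) 0 [])
                  0 true)))
            (PySem.List.len move) []) g false := by
      simp only [isReach]
      rw [if_neg hms]
      rfl
    have hfrow : (PySem.List.pyRange 0 (move.sum*2+1) 1).map (fun _ => false)
        = List.replicate (2*M+1) false := by
      rw [List.map_const']
      congr 1
      rw [PySem.List.length_pyRange_one]
      omega
    have hdp0 : (PySem.List.pyRange 0 (PySem.List.len move + 1) 1).map (fun _ =>
          (PySem.List.pyRange 0 (move.sum*2+1) 1).map (fun _ => false))
        = List.replicate (move.length+1) (List.replicate (2*M+1) false) := by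
      simp only [hfrow]
      rw [List.map_const']
      congr 1
      rw [PySem.List.length_pyRange_one, PySem.List.len_eq]
      omega
    rw [hA, hdp0]
    have hdp1 : PySem.List.pySetD
          (List.replicate (move.length+1) (List.replicate (2*M+1) false)) 0
          (PySem.List.pySetD
            (PySem.List.pyGetD (List.replicate (move.length+1) (List.replicate (2*M+1) false)) 0 []) 0 true)
        = (List.replicate (move.length+1) (List.replicate (2*M+1) false)).set 0 (pvRow (1 <<< M) M) := by
      rw [PySem.List.pySetD_of_nonneg _ _ le_rfl]
      congr 1
      rw [PySem.List.pyGetD_zero]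
      rw [List.replicate_succ, List.getD_cons_zero]
      rw [PySem.List.pySetD_of_nonneg _ _ le_rfl, pv_row_init]
      rfl
    rw [hdp1]
    have hrange : PySem.List.pyRange (-move.sum) (move.sum+1) 1
        = PySem.List.pyRange (-(M:Int)) ((M:Int)+1) 1 := by rw [hM]
    simp only [hrange, PySem.List.len_eq]
    obtain ⟨hlenF, hrowsF⟩ := pv_outer move is_x M hn hM move.length le_rfl
    rw [PySem.List.pyGetD_natCast]
    rw [hrowsF move.length (by omega), if_pos le_rfl]
    rw [pv_read (pvMask is_x move M move.length) M g (by omega) (by omega)]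
    congr 1
    omega

-- ===== VERDICT (by name: the statement is the Claim_ definition above) =====
theorem isReach_spec : Claim_equal_isReach := by
  intro goal move is_x _ hpre
  unfold Pre_isReach at hpre
  unfold Spec_isReach
  exact pv_main goal move is_x hpre
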